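-- pv_equiv track=rewrite | github.com/IIlya-ipti/Intelligent-Placer | src/algorithms.py | max_width
-- ===== SOURCE A (Python) =====
-- def max_width(a):
--     v = [0 for i in range(len(a))]
--     stack = []
--     for i in range(len(a)):
--         if len(stack) == 0:
--             stack.append((a[i], i))
--         else:
--             j = len(stack) - 1
--             while (j >= 0 and stack[j][0] > a[i]):
--                 v[stack[j][1]] += i - stack[j][1]
--                 stack.pop()
--                 j -= 1
--             stack.append((a[i], i))
--     j = len(stack) - 1
--     while (len(stack) != 0):
--         v[stack[j][1]] += i - stack[j][1] + 1
--         stack.pop()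
--         j -= 1
--     return v
-- ===== SOURCE B (Python) =====
-- def max_width(a):
--     n = len(a)
--     v = [0] * n
--     for k in range(n):
--         i = k + 1
--         while i < n and a[i] >= a[k]:
--             i += 1
--         v[k] = i - k
--     return v
-- ===== Notes on version B (the rewrite author's own statement) =====
-- stated objective: simpler
-- what changed: Replaces the monotonic stack with a direct per-index forward scan: v[k] is the distance from k to the first strictly smaller element to its right (or to the end), computed by a plain nested loop with no auxiliary stack.
import Mathlib
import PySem

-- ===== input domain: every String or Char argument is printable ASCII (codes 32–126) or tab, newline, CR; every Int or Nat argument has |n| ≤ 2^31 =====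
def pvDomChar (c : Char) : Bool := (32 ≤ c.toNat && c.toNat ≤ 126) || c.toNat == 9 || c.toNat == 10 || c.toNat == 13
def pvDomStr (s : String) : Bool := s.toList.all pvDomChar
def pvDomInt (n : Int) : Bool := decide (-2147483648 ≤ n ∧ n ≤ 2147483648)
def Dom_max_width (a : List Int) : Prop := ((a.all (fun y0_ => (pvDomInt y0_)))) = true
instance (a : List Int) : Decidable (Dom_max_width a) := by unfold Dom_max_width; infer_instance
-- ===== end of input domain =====

-- B replaces A's monotonic-stack sweep by a plain per-index forward scan to the next strictly
-- smaller element (simpler, no auxiliary stack); equal return value proved on all inputs.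


-- ===== PORT A =====
-- v[stack[j][1]] += …  (list element update; index is always in range in A)
def pvBump (v : List Int) (j : Nat) (d : Int) : List Int :=
  v.set j (v.getD j 0 + d)

-- the inner 'while (j >= 0 and stack[j][0] > a[i]): …; stack.pop(); …' loop;
-- the Lean list holds the Python stack top-first (head = stack[-1])
def pvPopLoop (ai : Int) (i : Nat) : List (Int × Nat) → List Int → List (Int × Nat) × List Int
  | [], v => ([], v)
  | (x, j) :: rest, v =>
    if x > ai then pvPopLoop ai i rest (pvBump v j ((i : Int) - (j : Int)))
    else ((x, j) :: rest, v)

-- the 'for i in range(len(a))' loop, counting i upward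
def pvMainLoop (a : List Int) (i : Nat) (st : List (Int × Nat)) (v : List Int) :
    List (Int × Nat) × List Int :=
  if _h : i < a.length then
    let ai := a.getD i 0
    if st = [] then pvMainLoop a (i + 1) ((ai, i) :: st) v
    else
      let (st', v') := pvPopLoop ai i st v
      pvMainLoop a (i + 1) ((ai, i) :: st') v'
  else (st, v)
  termination_by a.length - i

-- the trailing 'while (len(stack) != 0)' loop; iLast is Python's leftover i = len(a) - 1
def pvFinalLoop (iLast : Int) : List (Int × Nat) → List Int → List Int
  | [], v => v
  | (_, j) :: rest, v => pvFinalLoop iLast rest (pvBump v j (iLast - (j : Int) + 1))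

def max_width (a : List Int) : List Int :=
  let v := List.replicate a.length (0 : Int)
  let (st, vf) := pvMainLoop a 0 [] v
  pvFinalLoop ((a.length : Int) - 1) st vf

-- ===== PORT B =====
-- 'i = k + 1; while i < n and a[i] >= a[k]: i += 1'
def pvScanFrom (a : List Int) (ak : Int) (i : Nat) : Nat :=
  if _h : i < a.length then
    if a.getD i 0 ≥ ak then pvScanFrom a ak (i + 1) else i
  else i
  termination_by a.length - i

def max_width_alt (a : List Int) : List Int :=
  (List.range a.length).map
    (fun k => ((pvScanFrom a (a.getD k 0) (k + 1) : Int) - (k : Int)))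

-- ===== PRECONDITION & SPEC =====
def Spec_max_width (a : List Int) (out : List Int) : Prop := out = max_width_alt a
instance (a : List Int) (out : List Int) : Decidable (Spec_max_width a out) := by unfold Spec_max_width; infer_instance

-- ===== CLAIM (what is proved, stated in full; the proofs are below) =====
def Claim_equal_max_width : Prop := ∀ (a : List Int), Dom_max_width a → Spec_max_width a (max_width a)

-- ===== LEMMAS AND PROOFS =====

-- abbreviation used only in proofs: B's stop index for position k
def pvStop (a : List Int) (k : Nat) : Nat := pvScanFrom a (a.getD k 0) (k + 1)

theorem scan_lb (a : List Int) (x : Int) (i : Nat) : i ≤ pvScanFrom a x i := by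
  fun_induction pvScanFrom a x i with
  | case1 i h hge ih => omega
  | case2 i h hge => omega
  | case3 i h => omega

theorem scan_le (a : List Int) (x : Int) (i : Nat) (h : i ≤ a.length) :
    pvScanFrom a x i ≤ a.length := by
  fun_induction pvScanFrom a x i with
  | case1 i h hge ih => exact ih (by omega)
  | case2 i h hge => omega
  | case3 i h => omega

theorem scan_stop (a : List Int) (x : Int) (i : Nat)
    (h : pvScanFrom a x i < a.length) : a.getD (pvScanFrom a x i) 0 < x := by
  fun_induction pvScanFrom a x i with
  | case1 i h hge ih => exact ih (by assumption)
  | case2 i h hge => omega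
  | case3 i hn => omega

theorem scan_mem (a : List Int) (x : Int) (i t : Nat) (h1 : i ≤ t)
    (h2 : t < pvScanFrom a x i) : x ≤ a.getD t 0 := by
  fun_induction pvScanFrom a x i with
  | case1 i h hge ih =>
    rcases Nat.eq_or_lt_of_le h1 with rfl | h1'
    · omega
    · exact ih (by omega) (by assumption)
  | case2 i h hge => omega
  | case3 i h => omega

-- the invariant of A's main loop, phrased against B's stop function
def pvInv (a : List Int) (i : Nat) (st : List (Int × Nat)) (v : List Int) : Prop :=
  (∀ p ∈ st, p.1 = a.getD p.2 0 ∧ p.2 < i ∧ i ≤ pvStop a p.2) ∧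
  st.Pairwise (fun p q => q.1 ≤ p.1 ∧ q.2 < p.2) ∧
  (∀ j, j < i → i ≤ pvStop a j → ∃ p ∈ st, p.2 = j) ∧
  v.length = a.length ∧
  (∀ k, k < a.length →
    v.getD k 0 = if pvStop a k < i then ((pvStop a k : Int) - k) else 0)

-- the weaker invariant holding during the inner pop loop at index i
def pvPInv (a : List Int) (i : Nat) (st : List (Int × Nat)) (v : List Int) : Prop :=
  (∀ p ∈ st, p.1 = a.getD p.2 0 ∧ p.2 < i ∧ i ≤ pvStop a p.2) ∧
  st.Pairwise (fun p q => q.1 ≤ p.1 ∧ q.2 < p.2) ∧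
  (∀ j, j < i → i + 1 ≤ pvStop a j → ∃ p ∈ st, p.2 = j) ∧
  v.length = a.length ∧
  (∀ k, k < a.length →
    v.getD k 0 = if pvStop a k < i ∨ (pvStop a k = i ∧ ¬ ∃ p ∈ st, p.2 = k)
      then ((pvStop a k : Int) - k) else 0)

theorem stop_lb (a : List Int) (k : Nat) : k + 1 ≤ pvStop a k := scan_lb a _ (k + 1)

theorem stop_stop (a : List Int) (k : Nat) (h : pvStop a k < a.length) :
    a.getD (pvStop a k) 0 < a.getD k 0 := scan_stop a _ (k + 1) h

theorem stop_mem (a : List Int) (k t : Nat) (h1 : k + 1 ≤ t) (h2 : t < pvStop a k) :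
    a.getD k 0 ≤ a.getD t 0 := scan_mem a _ (k + 1) t h1 h2

theorem getD_set (v : List Int) (j k : Nat) (x : Int) :
    (v.set j x).getD k 0 = if j = k ∧ j < v.length then x else v.getD k 0 := by
  rcases eq_or_ne j k with rfl | hne
  · by_cases h : j < v.length
    · simp [List.getD_eq_getElem?_getD, h]
    · simp [List.getD_eq_getElem?_getD, h]
  · simp [List.getD_eq_getElem?_getD, hne]

theorem pop_spec (a : List Int) (i : Nat) :
    ∀ (st : List (Int × Nat)) (v : List Int), pvPInv a i st v →
    pvPInv a i (pvPopLoop (a.getD i 0) i st v).1 (pvPopLoop (a.getD i 0) i st v).2 ∧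
    ∀ p ∈ (pvPopLoop (a.getD i 0) i st v).1, p.1 ≤ a.getD i 0 := by
  intro st
  induction st with
  | nil =>
    intro v hInv
    exact ⟨by simpa [pvPopLoop] using hInv, by simp [pvPopLoop]⟩
  | cons hd tl ih =>
    intro v hInv
    obtain ⟨hmem, hpw, hcomp, hlen, hval⟩ := hInv
    obtain ⟨x, j⟩ := hd
    obtain ⟨hx, hjlt, hjstop⟩ := hmem (x, j) (List.mem_cons_self ..)
    simp only at hx hjlt hjstop
    have hjtl : ¬ ∃ p ∈ tl, p.2 = j := by
      rintro ⟨p, hp, hpj⟩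
      have := (List.pairwise_cons.mp hpw).1 p hp
      omega
    by_cases hpop : x > a.getD i 0
    · -- top is popped: its stop index is exactly i
      have hstopj : pvStop a j = i := by
        rcases Nat.eq_or_lt_of_le hjstop with h | h
        · omega
        · exfalso
          have := stop_mem a j i (by omega) h
          omega
      simp only [pvPopLoop, if_pos hpop]
      apply ih
      refine ⟨fun p hp => hmem p (List.mem_cons_of_mem _ hp),
        (List.pairwise_cons.mp hpw).2, ?_, by simp [pvBump, hlen], ?_⟩
      · intro j' hj' hstop'
        obtain ⟨p, hp, hpj⟩ := hcomp j' hj' hstop'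
        rcases List.mem_cons.mp hp with rfl | hp'
        · exfalso
          have hjj : j = j' := hpj
          subst hjj
          omega
        · exact ⟨p, hp', hpj⟩
      · intro k hk
        unfold pvBump
        rw [getD_set]
        rcases eq_or_ne j k with rfl | hne
        · -- k = j : was 0 (in stack), becomes i - j, which is its final value
          have hc1 : ¬ (pvStop a j < i ∨ (pvStop a j = i ∧ ¬ ∃ p ∈ (x, j) :: tl, p.2 = j)) := by
            rintro (h | ⟨_, hnot⟩)
            · omega
            · exact hnot ⟨(x, j), List.mem_cons_self .., rfl⟩
          have hvj : v.getD j 0 = 0 := by rw [hval j hk]; exact if_neg hc1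
          rw [if_pos ⟨rfl, by omega⟩, hvj,
            if_pos (Or.inr ⟨hstopj, hjtl⟩ :
              pvStop a j < i ∨ (pvStop a j = i ∧ ¬ ∃ p ∈ tl, p.2 = j)), hstopj]
          omega
        · -- k ≠ j : value unchanged, membership unchanged
          have hmemiff : (∃ p ∈ (x, j) :: tl, p.2 = k) ↔ (∃ p ∈ tl, p.2 = k) := by
            constructor
            · rintro ⟨p, hp, hpj⟩
              rcases List.mem_cons.mp hp with rfl | hp'
              · exact absurd hpj hne
              · exact ⟨p, hp', hpj⟩
            · rintro ⟨p, hp, hpj⟩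
              exact ⟨p, List.mem_cons_of_mem _ hp, hpj⟩
          rw [if_neg (fun h => hne h.1), hval k hk]
          simp only [hmemiff]
    · -- top survives: the loop stops here
      simp only [pvPopLoop, if_neg hpop]
      refine ⟨⟨hmem, hpw, hcomp, hlen, hval⟩, ?_⟩
      intro p hp
      rcases List.mem_cons.mp hp with rfl | hp'
      · omega
      · have := (List.pairwise_cons.mp hpw).1 p hp'
        omega

-- one iteration of the outer for loop preserves the invariant
theorem step_spec (a : List Int) (i : Nat) (hi : i < a.length)
    (st : List (Int × Nat)) (v : List Int) (hInv : pvInv a i st v) :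
    pvInv a (i + 1) ((a.getD i 0, i) :: (pvPopLoop (a.getD i 0) i st v).1)
      (pvPopLoop (a.getD i 0) i st v).2 := by
  obtain ⟨hmem, hpw, hcomp, hlen, hval⟩ := hInv
  have hP : pvPInv a i st v := by
    refine ⟨hmem, hpw, fun j hj hstop => hcomp j hj (by omega), hlen, ?_⟩
    intro k hk
    rw [hval k hk]
    by_cases h1 : pvStop a k < i
    · simp [h1]
    · have h2 : ¬ (pvStop a k = i ∧ ¬ ∃ p ∈ st, p.2 = k) := by
        rintro ⟨hki, hnot⟩
        have := stop_lb a k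
        exact hnot (hcomp k (by omega) (by omega))
      rw [if_neg h1, if_neg (fun h => h.elim h1 h2)]
  obtain ⟨⟨hmem', hpw', hcomp', hlen', hval'⟩, hbound⟩ := pop_spec a i st v hP
  -- every survivor's stop index is at least i + 1
  have hsurv : ∀ p ∈ (pvPopLoop (a.getD i 0) i st v).1, i + 1 ≤ pvStop a p.2 := by
    intro p hp
    obtain ⟨hp1, hp2, hp3⟩ := hmem' p hp
    rcases Nat.eq_or_lt_of_le hp3 with h | h
    · exfalso
      have hlt := stop_stop a p.2 (by omega)
      rw [← h] at hlt
      have := hbound p hp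
      omega
    · omega
  refine ⟨?_, ?_, ?_, hlen', ?_⟩
  · intro p hp
    rcases List.mem_cons.mp hp with rfl | hp'
    · exact ⟨rfl, by omega, stop_lb a i⟩
    · obtain ⟨h1, h2, _⟩ := hmem' p hp'
      exact ⟨h1, by omega, hsurv p hp'⟩
  · refine List.pairwise_cons.mpr ⟨?_, hpw'⟩
    intro p hp
    obtain ⟨_, h2, _⟩ := hmem' p hp
    exact ⟨hbound p hp, h2⟩
  · intro j' hj' hstop'
    rcases Nat.lt_succ_iff_lt_or_eq.mp hj' with h | rfl
    · obtain ⟨p, hp, hpj⟩ := hcomp' j' h hstop'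
      exact ⟨p, List.mem_cons_of_mem _ hp, hpj⟩
    · exact ⟨(a.getD j' 0, j'), List.mem_cons_self .., rfl⟩
  · intro k hk
    rw [hval' k hk]
    by_cases h1 : pvStop a k < i + 1
    · rw [if_pos h1]
      rcases Nat.lt_or_ge (pvStop a k) i with h2 | h2
      · rw [if_pos (Or.inl h2)]
      · have hki : pvStop a k = i := by omega
        have hknot : ¬ ∃ p ∈ (pvPopLoop (a.getD i 0) i st v).1, p.2 = k := by
          rintro ⟨p, hp, hpj⟩
          have := hsurv p hp
          rw [hpj] at this
          omega
        rw [if_pos (Or.inr ⟨hki, hknot⟩)]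
    · have h2 : ¬ (pvStop a k < i ∨ (pvStop a k = i ∧ ¬ ∃ p ∈ (pvPopLoop (a.getD i 0) i st v).1, p.2 = k)) := by
        rintro (h | ⟨h, _⟩)
        · omega
        · omega
      rw [if_neg h2, if_neg h1]

theorem main_spec (a : List Int) : ∀ (i : Nat) (st : List (Int × Nat)) (v : List Int),
    i ≤ a.length → pvInv a i st v →
    pvInv a a.length (pvMainLoop a i st v).1 (pvMainLoop a i st v).2 := by
  intro i st v
  fun_induction pvMainLoop a i st v with
  | case1 i v hlt ai ih =>
    intro _ hInv
    apply ih (by omega)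
    have := step_spec a i hlt [] v hInv
    simpa [pvPopLoop] using this
  | case2 i st v hlt ai hne st' v' heq ih =>
    intro _ hInv
    apply ih (by omega)
    have := step_spec a i hlt st v hInv
    rw [heq] at this
    simpa using this
  | case3 i st v hnlt =>
    intro hle hInv
    have : i = a.length := by omega
    subst this
    exact hInv

theorem final_spec (a : List Int) : ∀ (st : List (Int × Nat)) (v : List Int),
    (∀ p ∈ st, p.2 < a.length ∧ pvStop a p.2 = a.length) →
    st.Pairwise (fun p q => q.2 < p.2) →
    v.length = a.length →
    (∀ k, k < a.length → (∃ p ∈ st, p.2 = k) → v.getD k 0 = 0) →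
    (∀ k, k < a.length → ¬ (∃ p ∈ st, p.2 = k) → v.getD k 0 = ((pvStop a k : Int) - k)) →
    ∀ k, k < a.length →
      (pvFinalLoop ((a.length : Int) - 1) st v).getD k 0 = ((pvStop a k : Int) - k) := by
  intro st
  induction st with
  | nil =>
    intro v _ _ _ _ hout k hk
    simpa [pvFinalLoop] using hout k hk (by simp)
  | cons hd tl ih =>
    intro v hmem hpw hlen hin hout k hk
    obtain ⟨x, j⟩ := hd
    obtain ⟨hjlt, hjstop⟩ := hmem (x, j) (List.mem_cons_self ..)
    simp only at hjlt hjstop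
    have hjnot : ¬ ∃ p ∈ tl, p.2 = j := by
      rintro ⟨p, hp, hpj⟩
      have := (List.pairwise_cons.mp hpw).1 p hp
      omega
    simp only [pvFinalLoop]
    apply ih
    · intro p hp; exact hmem p (List.mem_cons_of_mem _ hp)
    · exact (List.pairwise_cons.mp hpw).2
    · simp [pvBump, hlen]
    · intro k' hk' hk'in
      obtain ⟨p, hp, hpj⟩ := hk'in
      have hne : j ≠ k' := by
        intro h; subst h; exact hjnot ⟨p, hp, hpj⟩
      unfold pvBump
      rw [getD_set]
      simp only [hne, false_and, if_false]
      exact hin k' hk' ⟨p, List.mem_cons_of_mem _ hp, hpj⟩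
    · intro k' hk' hk'out
      unfold pvBump
      rw [getD_set]
      rcases eq_or_ne j k' with rfl | hne
      · have hv0 : v.getD j 0 = 0 := hin j hk' ⟨(x, j), List.mem_cons_self .., rfl⟩
        rw [if_pos ⟨rfl, by omega⟩, hv0, hjstop]
        omega
      · simp only [hne, false_and, if_false]
        apply hout k' hk'
        rintro ⟨p, hp, hpj⟩
        rcases List.mem_cons.mp hp with rfl | hp'
        · exact hne hpj
        · exact hk'out ⟨p, hp', hpj⟩
    · exact hk

theorem length_final (iLast : Int) : ∀ (st : List (Int × Nat)) (v : List Int),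
    (pvFinalLoop iLast st v).length = v.length := by
  intro st
  induction st with
  | nil => intro v; simp [pvFinalLoop]
  | cons hd tl ih =>
    intro v
    obtain ⟨x, j⟩ := hd
    simp [pvFinalLoop, ih, pvBump]

-- ===== VERDICT (by name: the statement is the Claim_ definition above) =====
theorem inv_init (a : List Int) : pvInv a 0 [] (List.replicate a.length 0) := by
  refine ⟨by simp, by simp, by omega, by simp, ?_⟩
  intro k hk
  have := scan_lb a (a.getD k 0) (k + 1)
  have h1 : ¬ pvStop a k < 0 := by omega
  simp [h1, hk]

theorem max_width_eq (a : List Int) : max_width a = max_width_alt a := by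
  have hpvInv := main_spec a 0 [] (List.replicate a.length 0) (by omega) (inv_init a)
  set res := pvMainLoop a 0 [] (List.replicate a.length 0) with hres
  obtain ⟨hmem, hpw, hcomp, hlen, hval⟩ := hpvInv
  have hmem' : ∀ p ∈ res.1, p.2 < a.length ∧ pvStop a p.2 = a.length := by
    intro p hp
    obtain ⟨_, h2, h3⟩ := hmem p hp
    have := scan_le a (a.getD p.2 0) (p.2 + 1) (by omega)
    exact ⟨h2, by unfold pvStop at h3 ⊢; omega⟩
  have hpw' : res.1.Pairwise (fun p q => q.2 < p.2) := by
    exact List.Pairwise.imp (fun h => h.2) hpw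
  have hin : ∀ k, k < a.length → (∃ p ∈ res.1, p.2 = k) → res.2.getD k 0 = 0 := by
    intro k hk ⟨p, hp, hpj⟩
    rw [hval k hk]
    have := (hmem' p hp).2
    rw [hpj] at this
    simp [this]
  have hout : ∀ k, k < a.length → ¬ (∃ p ∈ res.1, p.2 = k) →
      res.2.getD k 0 = ((pvStop a k : Int) - k) := by
    intro k hk hnot
    rw [hval k hk]
    have hle := scan_le a (a.getD k 0) (k + 1) (by omega)
    have hlt : pvStop a k < a.length := by
      rcases Nat.lt_or_ge (pvStop a k) a.length with h | h
      · exact h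
      · exact absurd (hcomp k hk (by omega)) hnot
    simp [hlt]
  have hfin := final_spec a res.1 res.2 hmem' hpw' hlen hin hout
  have hlenf : (pvFinalLoop ((a.length : Int) - 1) res.1 res.2).length = a.length := by
    rw [length_final, hlen]
  have hA : max_width a = pvFinalLoop ((a.length : Int) - 1) res.1 res.2 := by
    simp only [max_width, ← hres]
  rw [hA]
  apply List.ext_getElem
  · simp [hlenf, max_width_alt]
  · intro k h1 h2
    have hk : k < a.length := by omega
    have := hfin k hk
    rw [List.getD_eq_getElem] at this
    · rw [this]
      simp [max_width_alt, pvStop]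
    · omega

theorem max_width_spec : Claim_equal_max_width := by
  intro a _
  unfold Spec_max_width
  exact max_width_eq a
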